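-- pv_equiv track=rewrite | github.com/nhsengland/nhsuk.moderation-api-public | src/helpers/common_functions.py | format_output_text
-- ===== SOURCE A (Python) =====
-- def format_output_text(stringval):
--     """Removes the unwanted characters in output text  and provides clean readable output .
--     Parameters:
--     stringval (str): The string to be cleaned and formatted.
--
--     Returns:
--     str: The cleaned and formatted string, with specific characters removed and certain sequences replaced for improved readability.
--     """
--
--     stringval = stringval.replace("},", "<br>")
--     for ch in [
--         "{",
--         "}",
--         "[",
--         "]",
--     ]:
--         if ch in stringval:
--             stringval = stringval.replace(ch, "")
--     return stringval
-- ===== SOURCE B (Python) =====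
-- def format_output_text(stringval):
--     """Single left-to-right scan doing the separator substitution and brace removal in one traversal."""
--     out = []
--     i = 0
--     n = len(stringval)
--     while i < n:
--         c = stringval[i]
--         if c == '}' and i + 1 < n and stringval[i + 1] == ',':
--             out.append('<br>')
--             i += 2
--         elif c in '{}[]':
--             i += 1
--         else:
--             out.append(c)
--             i += 1
--     return ''.join(out)
-- ===== Notes on version B (the rewrite author's own statement) =====
-- stated objective: alternative
-- what changed: Replaces the five sequential str.replace passes (the separator substitution followed by four brace removals) with a single left-to-right scan that emits the substitution, drops lone braces/brackets and copies everything else in one traversal.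
import Mathlib
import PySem

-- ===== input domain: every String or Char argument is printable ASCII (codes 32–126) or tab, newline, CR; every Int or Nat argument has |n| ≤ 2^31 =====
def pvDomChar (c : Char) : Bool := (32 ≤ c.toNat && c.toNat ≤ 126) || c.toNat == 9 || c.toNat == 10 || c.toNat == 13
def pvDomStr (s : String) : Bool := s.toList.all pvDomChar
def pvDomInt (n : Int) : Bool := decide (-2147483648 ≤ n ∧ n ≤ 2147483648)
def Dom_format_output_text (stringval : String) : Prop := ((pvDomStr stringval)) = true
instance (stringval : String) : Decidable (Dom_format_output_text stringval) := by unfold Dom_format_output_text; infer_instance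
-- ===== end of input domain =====

-- B replaces A's five sequential replace passes (separator substitution, then four brace removals) by one left-to-right scan; same value on all inputs.

-- ===== PORT A =====
def format_output_text (stringval : String) : String :=
  let s1 := PySem.Str.replace stringval "}," "<br>"
  (["{", "}", "[", "]"]).foldl
    (fun sv ch => if PySem.Str.isIn ch sv then PySem.Str.replace sv ch "" else sv) s1

-- ===== PORT B =====
-- Source B's while-loop over indices, transliterated as recursion over the remaining characters
def fmtScan : List Char → List Char
  | [] => []
  | c :: t =>
    if c = '}' ∧ t.head? = some ',' then
      '<' :: 'b' :: 'r' :: '>' :: fmtScan t.tail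
    else if c = '{' ∨ c = '}' ∨ c = '[' ∨ c = ']' then
      fmtScan t
    else
      c :: fmtScan t
termination_by l => l.length
decreasing_by
  all_goals simp [List.length_tail]

def format_output_text_alt (stringval : String) : String :=
  String.ofList (fmtScan stringval.toList)

-- ===== PRECONDITION & SPEC =====
def Spec_format_output_text (stringval : String) (out : String) : Prop := out = format_output_text_alt stringval
instance (stringval : String) (out : String) : Decidable (Spec_format_output_text stringval out) := by unfold Spec_format_output_text; infer_instance

-- ===== CLAIM (what is proved, stated in full; the proofs are below) =====
def Claim_equal_format_output_text : Prop := ∀ (stringval : String), Dom_format_output_text stringval → Spec_format_output_text stringval (format_output_text stringval)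

-- ===== LEMMAS AND PROOFS =====

-- the combined brace filter
def pvNotBrace (c : Char) : Bool := !(c == '{' || c == '}' || c == '[' || c == ']')

-- replace by a single character with "" is a filter
theorem replace_go_single (c : Char) :
    ∀ (fuel : Nat) (l acc : List Char), l.length ≤ fuel →
      PySem.Chars.replace.go [c] [] fuel l acc = acc.reverse ++ l.filter (fun x => !(x == c)) := by
  intro fuel
  induction fuel with
  | zero =>
    intro l acc h
    have : l = [] := List.length_eq_zero_iff.mp (Nat.le_zero.mp h)
    subst this
    simp [PySem.Chars.replace.go]
  | succ n ih =>
    intro l acc h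
    cases l with
    | nil => simp [PySem.Chars.replace.go]
    | cons x t =>
      simp only [List.length_cons] at h
      simp only [PySem.Chars.replace.go]
      by_cases hx : x = c
      · subst hx
        have hp : List.isPrefixOf [x] (x :: t) = true := by simp [List.isPrefixOf]
        rw [if_pos hp]
        simp only [List.length_cons, List.length_nil, Nat.zero_add, List.drop_succ_cons,
          List.drop_zero, List.reverse_nil, List.nil_append]
        rw [ih t acc (by omega)]
        simp
      · have hp : List.isPrefixOf [c] (x :: t) = false := by
          simp [List.isPrefixOf]
          exact fun hh => (hx hh.symm).elim
        rw [if_neg (by simp [hp])]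
        rw [ih t (x :: acc) (by omega)]
        simp [hx]

theorem replace_single_eq_filter (c : Char) (l : List Char) :
    PySem.Chars.replace l [c] [] = l.filter (fun x => !(x == c)) := by
  simp only [PySem.Chars.replace, List.isEmpty_cons]
  rw [if_neg (by simp)]
  rw [replace_go_single c l.length l [] (le_refl _)]
  simp

-- the guarded replace-with-"" step is a filter whether or not the char occurs
theorem step_eq_filter (c : Char) (l : List Char) :
    (if PySem.Chars.isIn [c] l then PySem.Chars.replace l [c] [] else l)
      = l.filter (fun x => !(x == c)) := by
  by_cases h : PySem.Chars.isIn [c] l = true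
  · rw [if_pos h, replace_single_eq_filter]
  · rw [if_neg h]
    have hni : ¬ ([c] <:+: l) := (PySem.Chars.isIn_eq_false_iff _ _).mp (by
      cases hb : PySem.Chars.isIn [c] l
      · rfl
      · exact absurd hb h)
    have hcm : c ∉ l := by
      intro hm
      obtain ⟨s, t, rfl⟩ := List.append_of_mem hm
      exact hni ⟨s, t, by simp⟩
    rw [List.filter_eq_self.mpr]
    intro a ha
    simp only [Bool.not_eq_eq_eq_not, Bool.not_true, beq_eq_false_iff_ne]
    intro he
    exact hcm (he ▸ ha)

-- the same guarded step at the String level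
theorem str_step_eq_filter (ch : String) (c : Char) (hc : ch.toList = [c]) (l : List Char) :
    (if PySem.Str.isIn ch (String.ofList l) then PySem.Str.replace (String.ofList l) ch "" else String.ofList l)
      = String.ofList (l.filter (fun x => !(x == c))) := by
  have h1 : PySem.Str.isIn ch (String.ofList l) = PySem.Chars.isIn [c] l := by
    rw [PySem.Str.isIn_eq, hc, String.toList_ofList]
  have h2 : PySem.Str.replace (String.ofList l) ch "" = String.ofList (PySem.Chars.replace l [c] []) := by
    simp [PySem.Str.replace, hc]
  rw [h1, h2]
  by_cases h : PySem.Chars.isIn [c] l = true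
  · rw [if_pos h, replace_single_eq_filter]
  · rw [if_neg h]
    rw [← step_eq_filter c l, if_neg h]

-- one pass of the "}," → "<br>" replacement, then the brace filter, equals B's scan
theorem go_br_filter :
    ∀ (fuel : Nat) (l acc : List Char), l.length ≤ fuel →
      (PySem.Chars.replace.go ['}', ','] ['<', 'b', 'r', '>'] fuel l acc).filter pvNotBrace
        = acc.reverse.filter pvNotBrace ++ fmtScan l := by
  intro fuel
  induction fuel with
  | zero =>
    intro l acc h
    have : l = [] := List.length_eq_zero_iff.mp (Nat.le_zero.mp h)
    subst this
    simp [PySem.Chars.replace.go, fmtScan]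
  | succ n ih =>
    intro l acc h
    cases l with
    | nil => simp [PySem.Chars.replace.go, fmtScan]
    | cons x t =>
      simp only [List.length_cons] at h
      simp only [PySem.Chars.replace.go]
      by_cases hp : List.isPrefixOf ['}', ','] (x :: t) = true
      · rw [if_pos hp]
        obtain ⟨hx, ht⟩ : x = '}' ∧ ∃ t', t = ',' :: t' := by
          cases t with
          | nil => simp [List.isPrefixOf] at hp
          | cons y t' =>
            simp [List.isPrefixOf] at hp
            exact ⟨hp.1.symm, t', by rw [← hp.2]⟩
        obtain ⟨t', rfl⟩ := ht
        subst hx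
        simp only [List.length_cons] at h
        rw [show List.drop ['}', ','].length ('}' :: ',' :: t') = t' from rfl]
        rw [ih t' _ (by omega)]
        rw [show fmtScan ('}' :: ',' :: t') = '<' :: 'b' :: 'r' :: '>' :: fmtScan t' from by
          rw [fmtScan]; simp]
        simp [pvNotBrace, List.filter_append]
      · rw [if_neg hp]
        rw [ih t (x :: acc) (by omega)]
        have hnot : ¬ (x = '}' ∧ t.head? = some ',') := by
          rintro ⟨hx, hh⟩
          cases t with
          | nil => simp at hh
          | cons y t' =>
            simp only [List.head?_cons, Option.some.injEq] at hh
            subst hx; subst hh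
            simp [List.isPrefixOf] at hp
        rw [show fmtScan (x :: t)
            = if x = '{' ∨ x = '}' ∨ x = '[' ∨ x = ']' then fmtScan t else x :: fmtScan t from by
          rw [fmtScan, if_neg hnot]]
        by_cases hb : x = '{' ∨ x = '}' ∨ x = '[' ∨ x = ']'
        · rw [if_pos hb]
          have hfb : pvNotBrace x = false := by
            rcases hb with h1 | h1 | h1 | h1 <;> subst h1 <;> rfl
          simp [hfb]
        · rw [if_neg hb]
          push Not at hb
          have hfb : pvNotBrace x = true := by
            simp [pvNotBrace, hb.1, hb.2.1, hb.2.2.1, hb.2.2.2]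
          simp [hfb]

theorem replace_br_filter (l : List Char) :
    (PySem.Chars.replace l ['}', ','] ['<', 'b', 'r', '>']).filter pvNotBrace = fmtScan l := by
  simp only [PySem.Chars.replace, List.isEmpty_cons]
  rw [if_neg (by simp)]
  rw [go_br_filter l.length l [] (le_refl _)]
  simp

theorem filter4_eq (l : List Char) :
    List.filter (fun x => !(x == ']'))
      (List.filter (fun x => !(x == '['))
        (List.filter (fun x => !(x == '}'))
          (List.filter (fun x => !(x == '{')) l))) = l.filter pvNotBrace := by
  simp only [List.filter_filter]
  apply List.filter_congr
  intro a _
  simp only [pvNotBrace]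
  cases h1 : a == '{' <;> cases h2 : a == '}' <;> cases h3 : a == '[' <;> cases h4 : a == ']' <;>
    simp_all

-- ===== VERDICT (by name: the statement is the Claim_ definition above) =====
theorem format_output_text_spec : Claim_equal_format_output_text := by
  intro s _
  unfold Spec_format_output_text format_output_text format_output_text_alt
  have hs1 : PySem.Str.replace s "}," "<br>"
      = String.ofList (PySem.Chars.replace s.toList ['}', ','] ['<', 'b', 'r', '>']) := by
    rfl
  simp only [List.foldl, hs1]
  rw [str_step_eq_filter "{" '{' rfl, str_step_eq_filter "}" '}' rfl,
    str_step_eq_filter "[" '[' rfl, str_step_eq_filter "]" ']' rfl,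
    filter4_eq, replace_br_filter]
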